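-- pv_equiv track=rewrite | github.com/grechsteiner/Tic-Tac-Toe | Tic Tac Toe Scalable.py | CreateGridCopy
-- ===== SOURCE A (Python) =====
-- def CreateGridCopy(size):
--     """Accept a list, create a size by size 2-d list with numbers like a number pad"""
--     #counter = a counter for the current "box available" being added to the list
--     #row = a list of the current row being added
--     #copy = the list being contructed
--
--     copy = []
--
--     counter = size*size - (size-1)
--     for rows in range(size):
--         row = []
--         for cols in range(size):
--             row.append(str(counter))
--             counter = counter + 1
--
--         counter = counter - (size*2)
--         copy.append(row)
--
--     return copy
-- ===== SOURCE B (Python) =====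
-- def CreateGridCopy(size):
--     """Accept a list, create a size by size 2-d list with numbers like a number pad"""
--     if size <= 0:
--         return []
--     nums = [str(n) for n in range(1, size * size + 1)]
--     rows = [nums[i * size:(i + 1) * size] for i in range(size)]
--     rows.reverse()
--     return rows
-- ===== Notes on version B (the rewrite author's own statement) =====
-- stated objective: simpler
-- what changed: Replaces the running counter with its per-row reset by a sequential build of str(1)..str(size*size), chunked into size rows and reversed to obtain the numpad layout.
import Mathlib
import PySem

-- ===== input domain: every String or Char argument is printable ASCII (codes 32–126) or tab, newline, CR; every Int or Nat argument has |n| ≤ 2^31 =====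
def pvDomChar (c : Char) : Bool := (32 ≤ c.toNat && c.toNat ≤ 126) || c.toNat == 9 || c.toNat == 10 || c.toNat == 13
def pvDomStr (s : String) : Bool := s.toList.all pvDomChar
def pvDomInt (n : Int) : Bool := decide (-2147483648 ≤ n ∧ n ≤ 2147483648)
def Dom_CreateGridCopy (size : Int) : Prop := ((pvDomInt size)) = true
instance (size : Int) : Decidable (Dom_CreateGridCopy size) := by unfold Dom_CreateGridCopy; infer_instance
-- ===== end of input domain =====

-- B builds str(1)..str(size*size) sequentially, chunks it into size rows and reverses them,
-- instead of A's running counter with its per-row '-size*2' reset; objective: simpler.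

-- ===== PORT A =====
-- inner loop body: row.append(str(counter)); counter += 1
def pvInnerStep (rc : List String × Int) (_cols : Int) : List String × Int :=
  (rc.1 ++ [PySem.Int.toStr rc.2], rc.2 + 1)

-- outer loop body: build row, counter -= size*2, copy.append(row)
def pvOuterStep (size : Int) (st : List (List String) × Int) (_rows : Int) :
    List (List String) × Int :=
  let rc := (PySem.List.pyRange 0 size 1).foldl pvInnerStep ([], st.2)
  (st.1 ++ [rc.1], rc.2 - size * 2)

def CreateGridCopy (size : Int) : List (List String) :=
  ((PySem.List.pyRange 0 size 1).foldl (pvOuterStep size)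
      ([], size * size - (size - 1))).1

-- ===== PORT B =====
-- nums = [str(n) for n in range(1, size*size+1)]
def pvNums (size : Int) : List String :=
  (PySem.List.pyRange 1 (size * size + 1) 1).map PySem.Int.toStr

-- rows = [nums[i*size:(i+1)*size] for i in range(size)]; rows.reverse(); return rows
def CreateGridCopy_alt (size : Int) : List (List String) :=
  if size ≤ 0 then []
  else
    ((PySem.List.pyRange 0 size 1).map
      (fun i => PySem.List.slice (pvNums size) (some (i * size)) (some ((i + 1) * size)))).reverse

-- ===== PRECONDITION & SPEC =====
def Spec_CreateGridCopy (size : Int) (out : List (List String)) : Prop := out = CreateGridCopy_alt size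
instance (size : Int) (out : List (List String)) : Decidable (Spec_CreateGridCopy size out) := by unfold Spec_CreateGridCopy; infer_instance

-- ===== CLAIM (what is proved, stated in full; the proofs are below) =====
def Claim_equal_CreateGridCopy : Prop := ∀ (size : Int), Dom_CreateGridCopy size → Spec_CreateGridCopy size (CreateGridCopy size)

-- ===== LEMMAS AND PROOFS =====

-- the row produced by A's inner loop, as a function of the starting counter
def pvRowOf (n : Nat) (x : Int) : List String :=
  (List.range n).map (fun (j : Nat) => PySem.Int.toStr (x + (j : Int)))

theorem pvInner_fold (l : List Int) (acc : List String) (c : Int) :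
    l.foldl pvInnerStep (acc, c)
      = (acc ++ (List.range l.length).map (fun (j : Nat) => PySem.Int.toStr (c + (j : Int))),
         c + (l.length : Int)) := by
  induction l generalizing acc c with
  | nil => simp
  | cons hd tl ih =>
      simp only [List.foldl_cons, pvInnerStep, ih, List.length_cons,
        List.range_succ_eq_map, List.map_cons, List.map_map]
      simp only [Prod.mk.injEq]
      refine ⟨?_, by push_cast; ring⟩
      rw [List.append_assoc, List.singleton_append]
      congr 2
      · simp
      · apply List.map_congr_left
        intro j _
        simp only [Function.comp_apply]; congr 1; push_cast; ring

theorem pvOuter_fold (size : Int) (l : List Int) (acc : List (List String)) (c : Int) :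
    l.foldl (pvOuterStep size) (acc, c)
      = (acc ++ (List.range l.length).map
            (fun (r : Nat) => pvRowOf size.toNat (c + (r : Int) * ((size.toNat : Int) - size * 2))),
         c + (l.length : Int) * ((size.toNat : Int) - size * 2)) := by
  induction l generalizing acc c with
  | nil => simp
  | cons hd tl ih =>
      simp only [List.foldl_cons, pvOuterStep, pvInner_fold, List.nil_append,
        PySem.List.length_pyRange_one, Int.sub_zero, ih, List.length_cons,
        List.range_succ_eq_map, List.map_cons, List.map_map]
      simp only [Prod.mk.injEq]
      refine ⟨?_, by push_cast; ring⟩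
      rw [List.append_assoc, List.singleton_append]
      congr 2
      · simp [pvRowOf]
      · apply List.map_congr_left
        intro r _
        simp only [Function.comp_apply]; congr 1; push_cast; ring

theorem pvA_closed (n : Nat) :
    CreateGridCopy (n : Int)
      = (List.range n).map (fun (r : Nat) =>
          pvRowOf n ((n : Int) * n - ((n : Int) - 1) - (r : Int) * n)) := by
  unfold CreateGridCopy
  rw [pvOuter_fold]
  simp only [PySem.List.length_pyRange_one, Int.sub_zero, Int.toNat_natCast, List.nil_append]
  apply List.map_congr_left
  intro r _
  congr 1
  ring

-- a take-of-drop chunk of a mapped range is a shifted mapped range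
theorem pvChunk (N a b : Nat) (f : Nat → String) (hab : a + b ≤ N) :
    (((List.range N).map f).drop a).take b
      = (List.range b).map (fun j => f (a + j)) := by
  apply List.ext_getElem
  · simp; omega
  · intro i h1 h2
    simp only [List.getElem_take, List.getElem_drop, List.getElem_map, List.getElem_range]

theorem pvB_closed (n : Nat) (hn : 0 < n) :
    CreateGridCopy_alt (n : Int)
      = ((List.range n).map (fun k =>
          (List.range n).map (fun j => PySem.Int.toStr (1 + ((k * n + j : Nat) : Int))))).reverse := by
  unfold CreateGridCopy_alt pvNums
  rw [if_neg (by omega)]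
  have hnums : (PySem.List.pyRange 1 ((n : Int) * n + 1) 1).map PySem.Int.toStr
      = (List.range (n * n)).map (fun k => PySem.Int.toStr (1 + (k : Nat))) := by
    rw [PySem.List.pyRange_one]
    have h1 : ((n : Int) * n + 1 - 1) = ((n * n : Nat) : Int) := by push_cast; ring
    rw [h1, Int.toNat_natCast, List.map_map]
    rfl
  rw [hnums, PySem.List.pyRange_one]
  have h0 : ((n : Int) - 0).toNat = n := by simp
  rw [h0, List.map_map]
  congr 1
  apply List.map_congr_left
  intro k hk
  have hkn : k < n := List.mem_range.mp hk
  simp only [Function.comp_apply]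
  have h1 : ((0 : Int) + (k : Int)) * n = ((k * n : Nat) : Int) := by push_cast; ring
  have h2 : ((0 : Int) + (k : Int) + 1) * n = ((k * n + n : Nat) : Int) := by push_cast; ring
  rw [h1, h2, PySem.List.slice_natCast]
  have h3 : k * n + n - k * n = n := by omega
  rw [h3, pvChunk (n * n) (k * n) n _ (by nlinarith)]

theorem CreateGridCopy_eq_alt (size : Int) :
    CreateGridCopy size = CreateGridCopy_alt size := by
  by_cases h : 0 < size
  · obtain ⟨n, rfl⟩ := Int.eq_ofNat_of_zero_le (le_of_lt h)
    rw [pvA_closed, pvB_closed n (by omega)]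
    apply List.ext_getElem
    · simp
    · intro r h1 h2
      simp only [List.length_map, List.length_range] at h1
      rw [List.getElem_reverse]
      simp only [List.getElem_map, List.getElem_range, List.length_map, List.length_range,
        pvRowOf]
      apply List.map_congr_left
      intro j _
      congr 1
      have hr : r < n := h1
      have hcast : ((n - 1 - r : Nat) : Int) = (n : Int) - 1 - (r : Int) := by omega
      push_cast [hcast]
      ring
  · have hnil : PySem.List.pyRange 0 size 1 = [] :=
      PySem.List.pyRange_one_eq_nil (by omega)
    simp [CreateGridCopy, CreateGridCopy_alt, hnil, if_pos (by omega : size ≤ 0)]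

-- ===== VERDICT (by name: the statement is the Claim_ definition above) =====
theorem CreateGridCopy_spec : Claim_equal_CreateGridCopy := by
  intro size _
  unfold Spec_CreateGridCopy
  exact CreateGridCopy_eq_alt size
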